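-- pv_equiv track=rewrite | github.com/paiml/depyler | examples/hard_edge_nested_loops.py | find_pair_in_matrix
-- ===== SOURCE A (Python) =====
-- def find_pair_in_matrix(m: list[list[int]], target: int) -> int:
--     """Find if any two elements in the matrix sum to target. Return 1/0."""
--     rows: int = len(m)
--     seen: dict[int, int] = {}
--     i: int = 0
--     while i < rows:
--         row: list[int] = m[i]
--         j: int = 0
--         while j < len(row):
--             complement: int = target - row[j]
--             if complement in seen:
--                 return 1
--             seen[row[j]] = 1
--             j = j + 1
--         i = i + 1
--     return 0
-- ===== SOURCE B (Python) =====
-- def find_pair_in_matrix(m: list[list[int]], target: int) -> int: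
--     """Find if any two elements in the matrix sum to target. Return 1/0."""
--     flat = [x for row in m for x in row]
--     for i, x in enumerate(flat):
--         if any(x + y == target for y in flat[i + 1:]):
--             return 1
--     return 0
-- ===== Notes on version B (the rewrite author's own statement) =====
-- stated objective: simpler
-- what changed: Replaces the single-pass complement hash over nested while-loops with a flatten followed by a brute-force pairwise scan over distinct positions i<j.
import Mathlib
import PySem

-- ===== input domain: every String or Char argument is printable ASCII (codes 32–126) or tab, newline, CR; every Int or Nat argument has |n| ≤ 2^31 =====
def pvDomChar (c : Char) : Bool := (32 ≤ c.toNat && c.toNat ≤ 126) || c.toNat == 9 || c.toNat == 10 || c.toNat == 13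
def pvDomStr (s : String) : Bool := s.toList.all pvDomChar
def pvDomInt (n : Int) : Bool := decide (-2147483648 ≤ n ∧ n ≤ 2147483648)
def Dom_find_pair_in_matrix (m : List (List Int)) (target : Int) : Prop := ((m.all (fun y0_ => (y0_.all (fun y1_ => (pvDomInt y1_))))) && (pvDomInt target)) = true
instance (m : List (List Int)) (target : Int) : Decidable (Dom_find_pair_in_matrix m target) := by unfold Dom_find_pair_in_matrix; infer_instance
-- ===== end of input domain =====

-- B replaces A's one-pass complement-hash scan with a flatten + brute-force pairwise scan
-- over distinct positions i<j (simpler to read, not faster).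

-- ===== PORT A =====
-- inner while loop: some seen' = fell through row updating seen, none = 'return 1' fired
def pvA_inner (target : Int) (row : List Int) (seen : PySem.Dict Int Int) :
    Option (PySem.Dict Int Int) :=
  match row with
  | [] => some seen
  | x :: r =>
    if seen.contains (target - x) then none
    else pvA_inner target r (seen.insert x 1)

-- outer while loop over the rows
def pvA_outer (target : Int) (rows : List (List Int)) (seen : PySem.Dict Int Int) : Int :=
  match rows with
  | [] => 0
  | row :: rs =>
    match pvA_inner target row seen with
    | none => 1
    | some s => pvA_outer target rs s

def find_pair_in_matrix (m : List (List Int)) (target : Int) : Int :=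
  pvA_outer target m PySem.Dict.empty

-- ===== PORT B =====
-- for i, x in enumerate(flat): if any(x + y == target for y in flat[i+1:]): return 1
def pvB_scan (target : Int) (xs : List Int) : Int :=
  match xs with
  | [] => 0
  | x :: r => if r.any (fun y => x + y == target) then 1 else pvB_scan target r

def find_pair_in_matrix_alt (m : List (List Int)) (target : Int) : Int :=
  pvB_scan target (m.flatMap (fun row => row))

-- ===== PRECONDITION & SPEC =====
def Spec_find_pair_in_matrix (m : List (List Int)) (target : Int) (out : Int) : Prop := out = find_pair_in_matrix_alt m target
instance (m : List (List Int)) (target : Int) (out : Int) : Decidable (Spec_find_pair_in_matrix m target out) := by unfold Spec_find_pair_in_matrix; infer_instance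

-- ===== CLAIM (what is proved, stated in full; the proofs are below) =====
def Claim_equal_find_pair_in_matrix : Prop := ∀ (m : List (List Int)) (target : Int), Dom_find_pair_in_matrix m target → Spec_find_pair_in_matrix m target (find_pair_in_matrix m target)

-- ===== LEMMAS AND PROOFS =====

-- A's loop, flattened to a single list of elements
def pvA_flat (target : Int) (seen : PySem.Dict Int Int) (xs : List Int) : Int :=
  match xs with
  | [] => 0
  | x :: r =>
    if seen.contains (target - x) then 1
    else pvA_flat target (seen.insert x 1) r

-- does some element of xs have its complement in seen?
def pvCross (target : Int) (seen : PySem.Dict Int Int) (xs : List Int) : Bool :=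
  xs.any (fun x => seen.contains (target - x))

-- does xs contain an (ordered) pair summing to target?
def pvInner (target : Int) (xs : List Int) : Bool :=
  match xs with
  | [] => false
  | x :: r => r.any (fun y => x + y == target) || pvInner target r

theorem pvA_flat_append (target : Int) (row ys : List Int) (seen : PySem.Dict Int Int) :
    pvA_flat target seen (row ++ ys) =
      (match pvA_inner target row seen with
       | none => 1
       | some s => pvA_flat target s ys) := by
  induction row generalizing seen with
  | nil => simp [pvA_inner]
  | cons x r ih =>
    simp only [List.cons_append, pvA_flat, pvA_inner]
    by_cases h : seen.contains (target - x) = true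
    · simp [h]
    · simp only [Bool.not_eq_true] at h
      simp [h, ih]

theorem pvA_outer_eq_flat (target : Int) (rows : List (List Int)) (seen : PySem.Dict Int Int) :
    pvA_outer target rows seen = pvA_flat target seen rows.flatten := by
  induction rows generalizing seen with
  | nil => simp [pvA_outer, pvA_flat]
  | cons row rs ih =>
    simp only [pvA_outer, List.flatten_cons, pvA_flat_append]
    cases pvA_inner target row seen with
    | none => rfl
    | some s => exact ih s

theorem pvCross_insert (target x : Int) (seen : PySem.Dict Int Int) (r : List Int) :
    pvCross target (seen.insert x 1) r =
      (r.any (fun y => x + y == target) || pvCross target seen r) := by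
  induction r with
  | nil => simp [pvCross]
  | cons z r ih =>
    simp only [pvCross, List.any_cons] at *
    rw [PySem.Dict.contains_insert]
    have hbeq : ((target - z == x) : Bool) = ((x + z == target) : Bool) := by
      by_cases h : target - z = x
      · simp [h, show x + z = target by omega]
      · simp [h, show x + z ≠ target by omega]
    rw [hbeq, ih]
    cases x + z == target <;> cases seen.contains (target - z) <;> simp

theorem pvA_flat_eq (target : Int) (xs : List Int) (seen : PySem.Dict Int Int) :
    pvA_flat target seen xs =
      (if pvCross target seen xs || pvInner target xs then 1 else 0) := by
  induction xs generalizing seen with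
  | nil => simp [pvA_flat, pvCross, pvInner]
  | cons x r ih =>
    simp only [pvA_flat, pvCross, pvInner, List.any_cons] at *
    by_cases h : seen.contains (target - x) = true
    · simp [h]
    · simp only [Bool.not_eq_true] at h
      rw [if_neg (by simp [h]), ih]
      have hc := pvCross_insert target x seen r
      simp only [pvCross] at hc
      simp only [hc, h, Bool.false_or]
      congr 1
      cases r.any (fun y => x + y == target) <;>
        cases pvCross target seen r <;> cases pvInner target r <;> simp

theorem pvB_scan_eq (target : Int) (xs : List Int) :
    pvB_scan target xs = (if pvInner target xs then 1 else 0) := by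
  induction xs with
  | nil => simp [pvB_scan, pvInner]
  | cons x r ih =>
    simp only [pvB_scan, pvInner]
    by_cases h : r.any (fun y => x + y == target) = true
    · simp [h]
    · simp only [Bool.not_eq_true] at h
      simp [h, ih]

-- ===== VERDICT (by name: the statement is the Claim_ definition above) =====
theorem find_pair_in_matrix_spec : Claim_equal_find_pair_in_matrix := by
  intro m target _
  unfold Spec_find_pair_in_matrix find_pair_in_matrix find_pair_in_matrix_alt
  rw [pvA_outer_eq_flat, pvA_flat_eq, pvB_scan_eq]
  have hflat : m.flatMap (fun row => row) = m.flatten := by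
    simp [List.flatMap_def]
  rw [hflat]
  have hcross : pvCross target PySem.Dict.empty m.flatten = false := by
    simp [pvCross, PySem.Dict.contains_empty]
  simp [hcross]
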